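-- pv_equiv track=rewrite | github.com/danielbarcohen-bot/ATE-shifting | utils.py | get_moves_and_moveBit
-- ===== SOURCE A (Python) =====
-- def get_moves_and_moveBit(common_causes, transformations_names):
--     bit_map = {}
--     counter = 0
--     for f in transformations_names:
--         group = f.split('_')[0]
--         for c in common_causes:
--             if (group, c) not in bit_map:
--                 bit_map[(group, c)] = counter
--                 counter += 1
--
--     # Pre-calculate moves: (func, col, bit_value)
--     # bit_value is 2^counter (e.g., 1, 2, 4, 8, 16...)
--     fast_moves = []
--     for c in common_causes:
--         for f in transformations_names:
--             group = f.split('_')[0]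
--             bit_pos = bit_map[(group, c)]
--             fast_moves.append((f, c, 1 << bit_pos))
--     return fast_moves
-- ===== SOURCE B (Python) =====
-- def get_moves_and_moveBit(common_causes, transformations_names):
--     # index each distinct cause and each distinct group by first-occurrence order,
--     # then compute every bit position with the closed form g_idx*U + c_idx
--     cause_index = {}
--     for c in common_causes:
--         if c not in cause_index:
--             cause_index[c] = len(cause_index)
--     group_index = {}
--     for f in transformations_names:
--         g = f.split('_')[0]
--         if g not in group_index:
--             group_index[g] = len(group_index)
--     U = len(cause_index)
--     return [(f, c, 1 << (group_index[f.split('_')[0]] * U + cause_index[c]))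
--             for c in common_causes for f in transformations_names]
-- ===== Notes on version B (the rewrite author's own statement) =====
-- stated objective: simpler
-- what changed: Replaces A's pair-keyed bit_map dictionary (built by a nested first-seen loop over transformation-group x cause pairs) with two small first-occurrence index dicts (one for causes, one for groups) and the closed-form bit position group_index*U + cause_index.
import Mathlib
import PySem

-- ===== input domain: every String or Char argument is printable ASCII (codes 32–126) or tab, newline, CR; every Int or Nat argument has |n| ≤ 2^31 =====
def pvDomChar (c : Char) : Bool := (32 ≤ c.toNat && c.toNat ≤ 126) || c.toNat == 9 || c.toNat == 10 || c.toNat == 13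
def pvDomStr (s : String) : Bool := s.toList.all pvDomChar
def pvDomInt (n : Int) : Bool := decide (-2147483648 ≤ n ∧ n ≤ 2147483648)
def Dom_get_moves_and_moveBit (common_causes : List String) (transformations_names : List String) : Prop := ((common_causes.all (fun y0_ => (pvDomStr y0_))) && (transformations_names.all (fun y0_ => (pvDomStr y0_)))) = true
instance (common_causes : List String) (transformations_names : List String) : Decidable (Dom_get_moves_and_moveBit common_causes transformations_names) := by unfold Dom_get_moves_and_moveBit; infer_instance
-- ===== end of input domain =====

-- B computes each bit position by the closed form group_index*U + cause_index from two
-- first-occurrence index dicts, instead of A's pair-keyed bit_map table (objective: simpler).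

-- shared helper for the Python expression f.split('_')[0] (split with a nonempty
-- separator always returns a nonempty list, so the [0] access never raises)
def pvGroup (f : String) : String := (((PySem.Str.split? f "_").getD []).headD "")

-- ===== PORT A =====
def get_moves_and_moveBit (common_causes : List String) (transformations_names : List String) : List (String × String × Int) :=
  let st := transformations_names.foldl
    (fun (st : PySem.Dict (String × String) Int × Int) f =>
      let group := pvGroup f
      common_causes.foldl
        (fun (st : PySem.Dict (String × String) Int × Int) c =>
          if st.1.contains (group, c) then st
          else (st.1.insert (group, c) st.2, st.2 + 1))
        st)
    (PySem.Dict.empty, 0)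
  let bit_map := st.1
  common_causes.foldl
    (fun acc c =>
      transformations_names.foldl
        (fun acc f =>
          let group := pvGroup f
          -- bit_map[(group, c)]: the key is always present (every (group, c) pair was
          -- inserted in the first phase), so Python never raises KeyError here; the
          -- .getD 0 default is unreachable.  1 << n is <<< on a nonnegative exponent.
          let bit_pos := (bit_map.get? (group, c)).getD 0
          acc ++ [(f, c, (1 : Int) <<< bit_pos.toNat)])
        acc)
    []

-- ===== PORT B =====
def get_moves_and_moveBit_alt (common_causes : List String) (transformations_names : List String) : List (String × String × Int) :=
  let cause_index := common_causes.foldl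
    (fun (d : PySem.Dict String Int) c =>
      if d.contains c then d else d.insert c (d.size : Int))
    PySem.Dict.empty
  let group_index := transformations_names.foldl
    (fun (d : PySem.Dict String Int) f =>
      let g := pvGroup f
      if d.contains g then d else d.insert g (d.size : Int))
    PySem.Dict.empty
  let U : Int := (cause_index.size : Int)
  common_causes.flatMap (fun c =>
    transformations_names.map (fun f =>
      -- dict lookups always succeed (keys were indexed above); .getD 0 unreachable
      (f, c, (1 : Int) <<<
        ((group_index.get? (pvGroup f)).getD 0 * U + (cause_index.get? c).getD 0).toNat)))

-- ===== PRECONDITION & SPEC =====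
def Spec_get_moves_and_moveBit (common_causes : List String) (transformations_names : List String) (out : List (String × String × Int)) : Prop := out = get_moves_and_moveBit_alt common_causes transformations_names
instance (common_causes : List String) (transformations_names : List String) (out : List (String × String × Int)) : Decidable (Spec_get_moves_and_moveBit common_causes transformations_names out) := by unfold Spec_get_moves_and_moveBit; infer_instance

-- ===== CLAIM (what is proved, stated in full; the proofs are below) =====
def Claim_equal_get_moves_and_moveBit : Prop := ∀ (common_causes : List String) (transformations_names : List String), Dom_get_moves_and_moveBit common_causes transformations_names → Spec_get_moves_and_moveBit common_causes transformations_names (get_moves_and_moveBit common_causes transformations_names)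

-- ===== LEMMAS AND PROOFS =====

-- `pvIdx k s` : the items list of a dict indexing the elements of s by k, k+1, …
def pvIdx {κ : Type} (k : Int) : List κ → List (κ × Int)
  | [] => []
  | a :: s => (a, k) :: pvIdx (k + 1) s

theorem pvIdx_append {κ : Type} (k : Int) (s : List κ) (c : κ) :
    pvIdx k (s ++ [c]) = pvIdx k s ++ [(c, k + s.length)] := by
  induction s generalizing k with
  | nil => simp [pvIdx]
  | cons a s ih =>
    simp only [List.cons_append, pvIdx, ih, List.length_cons]
    rw [show (k + (((s.length + 1 : Nat)) : Int)) = (k + 1) + (s.length : Int) by push_cast; ring]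

theorem pvIdx_length {κ : Type} (k : Int) (s : List κ) : (pvIdx k s).length = s.length := by
  induction s generalizing k with
  | nil => rfl
  | cons a s ih => simp [pvIdx, ih]

theorem get?_mk_pvIdx {κ : Type} [BEq κ] [LawfulBEq κ] (k : Int) (s : List κ) (x : κ) :
    (PySem.Dict.mk (pvIdx k s)).get? x =
      if x ∈ s then some (k + (s.idxOf x : Int)) else none := by
  induction s generalizing k with
  | nil => simp [pvIdx, PySem.Dict.get?]
  | cons a s ih =>
    rw [pvIdx, PySem.Dict.get?_mk_cons, ih]
    by_cases h : a = x
    · simp [h, List.idxOf_cons_self]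
    · have hne : (a == x) = false := by simp [h]
      simp only [hne, Bool.false_eq_true, if_false]
      by_cases hm : x ∈ s
      · rw [if_pos hm, if_pos (List.mem_cons_of_mem a hm), List.idxOf_cons, hne]
        simp only [cond_false, Option.some.injEq]
        push_cast
        ring
      · have hnm : x ∉ a :: s := by
          intro hx
          rcases List.mem_cons.mp hx with he | hx'
          · exact h he.symm
          · exact hm hx'
        rw [if_neg hm, if_neg hnm]

theorem contains_mk_pvIdx {κ : Type} [BEq κ] [LawfulBEq κ] (k : Int) (s : List κ) (x : κ) :
    (PySem.Dict.mk (pvIdx k s)).contains x = decide (x ∈ s) := by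
  rw [PySem.Dict.contains_eq_isSome_get?, get?_mk_pvIdx]
  by_cases h : x ∈ s <;> simp [h]

theorem get?_mk_append {κ ν : Type} [BEq κ] (a b : List (κ × ν)) (x : κ) :
    (PySem.Dict.mk (a ++ b)).get? x =
      ((PySem.Dict.mk a).get? x).orElse (fun _ => (PySem.Dict.mk b).get? x) := by
  induction a with
  | nil => simp [PySem.Dict.get?]
  | cons p a ih =>
    obtain ⟨pk, pv⟩ := p
    rw [List.cons_append, PySem.Dict.get?_mk_cons, PySem.Dict.get?_mk_cons, ih]
    by_cases h : (pk == x) = true <;> simp [h]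

theorem contains_mk_append {κ ν : Type} [BEq κ] (a b : List (κ × ν)) (x : κ) :
    (PySem.Dict.mk (a ++ b)).contains x =
      ((PySem.Dict.mk a).contains x || (PySem.Dict.mk b).contains x) := by
  rw [PySem.Dict.contains_eq_isSome_get?, PySem.Dict.contains_eq_isSome_get?,
    PySem.Dict.contains_eq_isSome_get?, get?_mk_append]
  cases (PySem.Dict.mk a).get? x <;> simp [Option.orElse]

-- entries for one group paired with every cause
def pvEnt (g : String) (k : Int) (s : List String) : List ((String × String) × Int) :=
  pvIdx k (s.map (Prod.mk g))

theorem pvEnt_nil (g : String) (k : Int) : pvEnt g k [] = [] := rfl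

theorem idxOf_map_prod (g : String) (s : List String) (c : String) :
    (s.map (Prod.mk g)).idxOf (g, c) = s.idxOf c := by
  induction s with
  | nil => rfl
  | cons a s ih =>
    simp only [List.map_cons, List.idxOf_cons, ih]
    by_cases h : a = c
    · simp [h]
    · have h1 : ((g, a) == (g, c)) = false := by simp [h]
      have h2 : (a == c) = false := by simp [h]
      simp [h1, h2]

theorem mem_map_prod (g g' : String) (s : List String) (c : String) :
    ((g', c) ∈ s.map (Prod.mk g)) ↔ (g' = g ∧ c ∈ s) := by
  constructor
  · intro h
    obtain ⟨a, ha, he⟩ := List.mem_map.mp h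
    obtain ⟨h1, h2⟩ := Prod.mk.injEq .. ▸ he
    exact ⟨h1.symm, h2 ▸ ha⟩
  · rintro ⟨rfl, hc⟩
    exact List.mem_map.mpr ⟨c, hc, rfl⟩

-- entries for a list of groups, each paired with every cause, bit positions from k on
def pvPE (cs : List String) (k : Int) : List String → List ((String × String) × Int)
  | [] => []
  | g :: gs => pvEnt g k cs ++ pvPE cs (k + cs.length) gs

theorem pvPE_append_singleton (cs : List String) (k : Int) (gs : List String) (g : String) :
    pvPE cs k (gs ++ [g]) = pvPE cs k gs ++ pvEnt g (k + gs.length * cs.length) cs := by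
  induction gs generalizing k with
  | nil => simp [pvPE]
  | cons g0 gs ih =>
    simp only [List.cons_append, pvPE, ih, List.append_assoc, List.length_cons]
    congr 3
    push_cast
    ring

theorem contains_mk_pvPE (cs : List String) (k : Int) (gs : List String) (g c : String) :
    (PySem.Dict.mk (pvPE cs k gs)).contains (g, c) = decide (g ∈ gs ∧ c ∈ cs) := by
  induction gs generalizing k with
  | nil => simp [pvPE, PySem.Dict.contains_eq_isSome_get?, PySem.Dict.get?]
  | cons g0 gs ih =>
    rw [pvPE, contains_mk_append, pvEnt, contains_mk_pvIdx, ih]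
    by_cases h0 : g = g0 <;> by_cases hc : c ∈ cs <;> by_cases hg : g ∈ gs <;>
      simp [mem_map_prod, h0, hc, hg]

theorem get?_mk_pvPE (cs : List String) (k : Int) (gs : List String) (g c : String)
    (hg : g ∈ gs) (hc : c ∈ cs) :
    (PySem.Dict.mk (pvPE cs k gs)).get? (g, c) =
      some (k + (gs.idxOf g : Int) * cs.length + (cs.idxOf c : Int)) := by
  induction gs generalizing k with
  | nil => cases hg
  | cons g0 gs ih =>
    rw [pvPE, get?_mk_append, pvEnt, get?_mk_pvIdx]
    by_cases h0 : g = g0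
    · subst h0
      rw [if_pos ((mem_map_prod g g cs c).mpr ⟨rfl, hc⟩)]
      simp [idxOf_map_prod, List.idxOf_cons_self]
    · have hnot : ¬ (g, c) ∈ cs.map (Prod.mk g0) := by
        intro h; exact h0 ((mem_map_prod g0 g cs c).mp h).1
      rw [if_neg hnot]
      have hg' : g ∈ gs := by
        rcases List.mem_cons.mp hg with h | h
        · exact absurd h h0
        · exact h
      rw [ih (k + cs.length) hg']
      have h2 : (g0 == g) = false := by
        simp only [beq_eq_false_iff_ne, ne_eq]
        exact fun h => h0 h.symm
      simp only [Option.orElse, List.idxOf_cons, h2, cond_false, Option.some.injEq]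
      push_cast
      ring

-- B's index-building loop builds exactly the dict indexing the first occurrences
theorem pvFoldIdx (ks : List String) (s : List String) :
    ks.foldl (fun (d : PySem.Dict String Int) k =>
        if d.contains k then d else d.insert k (d.size : Int))
      (PySem.Dict.mk (pvIdx 0 s))
    = PySem.Dict.mk (pvIdx 0 (PySem.Set.update s ks)) := by
  induction ks generalizing s with
  | nil => rfl
  | cons k ks ih =>
    rw [List.foldl_cons, contains_mk_pvIdx]
    have hupd : PySem.Set.update s (k :: ks) = PySem.Set.update (PySem.Set.add s k) ks := rfl
    by_cases h : k ∈ s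
    · have hadd : PySem.Set.add s k = s := by
        simp [PySem.Set.add, h]
      rw [if_pos (by simp [h]), hupd, hadd, ih]
    · have hadd : PySem.Set.add s k = s ++ [k] := by
        simp [PySem.Set.add, h]
      have hfresh : (PySem.Dict.mk (pvIdx 0 s)).contains k = false := by
        rw [contains_mk_pvIdx]; simp [h]
      have hins : (PySem.Dict.mk (pvIdx 0 s)).insert k
          ((PySem.Dict.mk (pvIdx 0 s)).size : Int) = PySem.Dict.mk (pvIdx 0 (s ++ [k])) := by
        apply PySem.Dict.ext
        rw [PySem.Dict.items_insert_of_not_contains _ _ hfresh]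
        show pvIdx 0 s ++ [(k, ((pvIdx 0 s).length : Int))] = _
        rw [pvIdx_append, pvIdx_length]
        simp
      rw [if_neg (by simp [h]), hins, hupd, hadd, ih]

-- A's inner loop over the causes, for a group not yet in the table: appends one
-- entry per first occurrence of a cause, with consecutive counters
theorem pvInnerFresh (g : String) (l : List String) (its0 : List ((String × String) × Int))
    (H : ∀ c, (PySem.Dict.mk its0).contains (g, c) = false) (k0 : Int) (s : List String) :
    l.foldl (fun (st : PySem.Dict (String × String) Int × Int) c =>
        if st.1.contains (g, c) then st else (st.1.insert (g, c) st.2, st.2 + 1))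
      (PySem.Dict.mk (its0 ++ pvEnt g k0 s), k0 + s.length)
    = (PySem.Dict.mk (its0 ++ pvEnt g k0 (PySem.Set.update s l)),
        k0 + (PySem.Set.update s l).length) := by
  induction l generalizing s with
  | nil => rfl
  | cons c l ih =>
    rw [List.foldl_cons]
    have hupd : PySem.Set.update s (c :: l) = PySem.Set.update (PySem.Set.add s c) l := rfl
    have hcont : (PySem.Dict.mk (its0 ++ pvEnt g k0 s)).contains (g, c) = decide (c ∈ s) := by
      rw [contains_mk_append, H, pvEnt, contains_mk_pvIdx]
      simp [mem_map_prod]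
    by_cases h : c ∈ s
    · have hadd : PySem.Set.add s c = s := by
        simp [PySem.Set.add, h]
      rw [hcont, if_pos (by simp [h]), hupd, hadd, ih]
    · have hadd : PySem.Set.add s c = s ++ [c] := by
        simp [PySem.Set.add, h]
      have hfresh : (PySem.Dict.mk (its0 ++ pvEnt g k0 s)).contains (g, c) = false := by
        rw [hcont]; simp [h]
      have hins : (PySem.Dict.mk (its0 ++ pvEnt g k0 s)).insert (g, c) (k0 + s.length)
          = PySem.Dict.mk (its0 ++ pvEnt g k0 (s ++ [c])) := by
        apply PySem.Dict.ext
        rw [PySem.Dict.items_insert_of_not_contains _ _ hfresh]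
        show (its0 ++ pvEnt g k0 s) ++ [((g, c), k0 + (s.length : Int))] = _
        rw [pvEnt, pvEnt, List.map_append, List.map_singleton, pvIdx_append, List.length_map,
          List.append_assoc]
      rw [hcont, if_neg (by simp [h]), hins, hupd, hadd]
      have h2 := ih (s ++ [c])
      rw [show (k0 + (((s ++ [c]).length : Nat) : Int)) = k0 + (s.length : Int) + 1 by
        simp
        ring] at h2
      exact h2

-- A's inner loop is the identity when every (group, cause) pair is already present
theorem pvInnerSeen (g : String) (l : List String)
    (d : PySem.Dict (String × String) Int) (k : Int)
    (H : ∀ c ∈ l, d.contains (g, c) = true) :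
    l.foldl (fun (st : PySem.Dict (String × String) Int × Int) c =>
        if st.1.contains (g, c) then st else (st.1.insert (g, c) st.2, st.2 + 1))
      (d, k) = (d, k) := by
  induction l with
  | nil => rfl
  | cons c l ih =>
    rw [List.foldl_cons, if_pos (H c (List.mem_cons_self ..))]
    exact ih (fun c hc => H c (List.mem_cons_of_mem _ hc))

-- A's outer loop: the bit_map indexes (group, cause) pairs, groups in first-occurrence
-- order of the transformations, causes in first-occurrence order of the causes list
theorem pvOuter (cc : List String) (ts' : List String) (gs : List String) :
    ts'.foldl (fun (st : PySem.Dict (String × String) Int × Int) f =>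
        cc.foldl (fun (st : PySem.Dict (String × String) Int × Int) c =>
            if st.1.contains (pvGroup f, c) then st
            else (st.1.insert (pvGroup f, c) st.2, st.2 + 1)) st)
      (PySem.Dict.mk (pvPE (PySem.Set.ofList cc) 0 gs),
        ((gs.length * (PySem.Set.ofList cc).length : Nat) : Int))
    = (PySem.Dict.mk (pvPE (PySem.Set.ofList cc) 0 (PySem.Set.update gs (ts'.map pvGroup))),
        (((PySem.Set.update gs (ts'.map pvGroup)).length * (PySem.Set.ofList cc).length : Nat) : Int)) := by
  induction ts' generalizing gs with
  | nil => rfl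
  | cons f ts' ih =>
    rw [List.foldl_cons]
    have hupd : PySem.Set.update gs ((f :: ts').map pvGroup)
        = PySem.Set.update (PySem.Set.add gs (pvGroup f)) (ts'.map pvGroup) := rfl
    by_cases h : pvGroup f ∈ gs
    · have hadd : PySem.Set.add gs (pvGroup f) = gs := by
        simp [PySem.Set.add, h]
      rw [pvInnerSeen _ _ _ _ (fun c hc => by
        rw [contains_mk_pvPE]
        simp [h, (PySem.Set.mem_ofList cc c).mpr hc]), hupd, hadd, ih]
    · have hadd : PySem.Set.add gs (pvGroup f) = gs ++ [pvGroup f] := by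
        simp [PySem.Set.add, h]
      have H : ∀ c, (PySem.Dict.mk (pvPE (PySem.Set.ofList cc) 0 gs)).contains
          (pvGroup f, c) = false := by
        intro c; rw [contains_mk_pvPE]; simp [h]
      have hstep := pvInnerFresh (pvGroup f) cc _ H
        ((gs.length * (PySem.Set.ofList cc).length : Nat) : Int) []
      simp only [pvEnt_nil, List.append_nil, List.length_nil,
        Nat.cast_zero, add_zero, PySem.Set.update_nil_left] at hstep
      rw [hstep, hupd, hadd]
      have h2 := ih (gs ++ [pvGroup f])
      rw [pvPE_append_singleton] at h2
      rw [show ((0 : Int) + (gs.length : Int) * ((PySem.Set.ofList cc).length : Int))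
          = ((gs.length * (PySem.Set.ofList cc).length : Nat) : Int) by push_cast; ring] at h2
      rw [show ((((gs ++ [pvGroup f]).length * (PySem.Set.ofList cc).length : Nat)) : Int)
          = ((gs.length * (PySem.Set.ofList cc).length : Nat) : Int)
            + (((PySem.Set.ofList cc).length : Nat) : Int) by
        simp [List.length_append]
        ring] at h2
      exact h2

-- ===== VERDICT (by name: the statement is the Claim_ definition above) =====
theorem get_moves_and_moveBit_spec : Claim_equal_get_moves_and_moveBit := by
  intro cc ts _
  show get_moves_and_moveBit cc ts = get_moves_and_moveBit_alt cc ts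
  unfold get_moves_and_moveBit get_moves_and_moveBit_alt
  simp only []
  have hpair : ((PySem.Dict.empty : PySem.Dict (String × String) Int), (0 : Int))
      = (PySem.Dict.mk (pvPE (PySem.Set.ofList cc) 0 []),
          ((List.length ([] : List String) * (PySem.Set.ofList cc).length : Nat) : Int)) := by
    rw [Prod.mk.injEq]
    exact ⟨rfl, by simp⟩
  rw [hpair, pvOuter cc ts [], PySem.Set.update_nil_left]
  have hgfold : ts.foldl (fun (d : PySem.Dict String Int) f =>
        if d.contains (pvGroup f) = true then d else d.insert (pvGroup f) (d.size : Int))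
        PySem.Dict.empty
      = (ts.map pvGroup).foldl (fun (d : PySem.Dict String Int) k =>
        if d.contains k = true then d else d.insert k (d.size : Int)) PySem.Dict.empty :=
    (List.foldl_map (f := pvGroup)
      (g := fun (d : PySem.Dict String Int) k =>
        if d.contains k = true then d else d.insert k (d.size : Int))
      (l := ts) (init := PySem.Dict.empty)).symm
  rw [hgfold]
  have he : (PySem.Dict.empty : PySem.Dict String Int) = PySem.Dict.mk (pvIdx 0 []) := rfl
  rw [he, pvFoldIdx, pvFoldIdx, PySem.Set.update_nil_left, PySem.Set.update_nil_left]
  simp only [PySem.List.foldl_append_singleton_eq_map, PySem.List.foldl_append_eq_flatMap,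
    List.nil_append]
  apply List.flatMap_congr
  intro c hc
  apply List.map_congr_left
  intro f hf
  have hg : pvGroup f ∈ PySem.Set.ofList (ts.map pvGroup) :=
    (PySem.Set.mem_ofList _ _).mpr (List.mem_map_of_mem hf)
  have hcm : c ∈ PySem.Set.ofList cc := (PySem.Set.mem_ofList _ _).mpr hc
  rw [get?_mk_pvPE _ _ _ _ _ hg hcm, get?_mk_pvIdx, get?_mk_pvIdx, if_pos hg, if_pos hcm]
  simp only [Option.getD_some, PySem.Dict.size, pvIdx_length]
  simp
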